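-- pv_equiv track=rewrite | github.com/Tim4316/CS-111-Python- | Problem Sets/PS 4/ps4pr3.py | count_evens_rec
-- ===== SOURCE A (Python) =====
-- def count_evens_rec(binvals):
--     if binvals == []:
--         return 0
--     else:
--         count_rest = count_evens_rec(binvals[1:])
--         if binvals[0][-1] == '0':
--             return 1 + count_rest
--         else:
--             return count_rest
-- ===== SOURCE B (Python) =====
-- def count_evens_rec(binvals):
--     lasts = [b[-1] for b in binvals]
--     return lasts.count('0')
-- ===== Notes on version B (the rewrite author's own statement) =====
-- stated objective: idiomatic
-- what changed: Replaces the recursion (with repeated binvals[1:] list copies) by two staged passes: a comprehension collecting each string's last character, then list.count('0').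
import Mathlib
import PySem

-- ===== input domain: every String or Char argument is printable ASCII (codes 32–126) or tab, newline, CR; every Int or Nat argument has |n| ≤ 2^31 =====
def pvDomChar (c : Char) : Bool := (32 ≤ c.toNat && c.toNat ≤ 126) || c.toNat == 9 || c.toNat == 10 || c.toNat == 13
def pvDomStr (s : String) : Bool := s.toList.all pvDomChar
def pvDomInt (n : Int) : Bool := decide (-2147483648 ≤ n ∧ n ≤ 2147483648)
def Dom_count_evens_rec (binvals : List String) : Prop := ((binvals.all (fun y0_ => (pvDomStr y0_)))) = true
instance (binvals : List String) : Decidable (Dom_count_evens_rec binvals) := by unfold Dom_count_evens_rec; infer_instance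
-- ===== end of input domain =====

-- B replaces the recursion by two staged passes (map last characters, then count '0'); equal on lists of non-empty strings.

-- ===== PORT A =====
-- A: literal recursion. binvals[0][-1] via PySem.Str.pyGet? s (-1); none (empty string) is excluded by Pre_.
def count_evens_rec (binvals : List String) : Int :=
  match binvals with
  | [] => 0
  | b :: rest =>
      let count_rest := count_evens_rec rest
      match PySem.Str.pyGet? b (-1) with
      | some c => if c = '0' then 1 + count_rest else count_rest
      | none => 0  -- Python raises IndexError here; outside Pre_

-- ===== PORT B =====
-- B: comprehension of last characters (none = IndexError, outside Pre_), then list.count('0').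
def count_evens_rec_alt (binvals : List String) : Int :=
  let lasts := binvals.map (fun b => PySem.Str.pyGet? b (-1))
  (PySem.List.count lasts (some '0') : Int)

-- ===== PRECONDITION & SPEC =====
-- Pre_ excludes lists containing an empty string, on which A (and B) raise IndexError at b[-1].
def Pre_count_evens_rec (binvals : List String) : Prop := ∀ b ∈ binvals, b ≠ ""
instance (binvals : List String) : Decidable (Pre_count_evens_rec binvals) := by unfold Pre_count_evens_rec; infer_instance
def pvWitness_count_evens_rec : List String := ["10", "11", "0"]
def Spec_count_evens_rec (binvals : List String) (out : Int) : Prop := out = count_evens_rec_alt binvals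
instance (binvals : List String) (out : Int) : Decidable (Spec_count_evens_rec binvals out) := by unfold Spec_count_evens_rec; infer_instance

-- ===== CLAIM =====
def Claim_equal_count_evens_rec : Prop := ∀ (binvals : List String), Dom_count_evens_rec binvals → Pre_count_evens_rec binvals → Spec_count_evens_rec binvals (count_evens_rec binvals)

-- ===== LEMMAS AND PROOFS =====
theorem count_evens_rec_eq (binvals : List String) (h : ∀ b ∈ binvals, b ≠ "") :
    count_evens_rec binvals
      = ((binvals.map (fun b => PySem.Str.pyGet? b (-1))).count (some '0') : Int) := by
  induction binvals with
  | nil => simp [count_evens_rec]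
  | cons b rest ih =>
    have hb : b ≠ "" := h b (by simp)
    have hrest : ∀ x ∈ rest, x ≠ "" := fun x hx => h x (by simp [hx])
    obtain ⟨c, hc⟩ : ∃ c, PySem.Str.pyGet? b (-1) = some c := by
      cases hc : PySem.Str.pyGet? b (-1) with
      | some c => exact ⟨c, rfl⟩
      | none =>
        exfalso
        apply hb
        cases hb' : b.toList with
        | nil => exact String.toList_inj.mp (by simp [hb'])
        | cons x xs =>
          simp [PySem.Str.pyGet?, PySem.List.pyGet?, PySem.List.pyIdx?, hb'] at hc
    simp only [count_evens_rec, List.map_cons, hc, List.count_cons, ih hrest]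
    by_cases h0 : c = '0'
    · simp [h0]; ring
    · simp [h0, Option.some.injEq]

-- ===== VERDICT =====
theorem count_evens_rec_spec : Claim_equal_count_evens_rec := by
  intro binvals _ hpre
  unfold Spec_count_evens_rec count_evens_rec_alt
  rw [count_evens_rec_eq binvals hpre]
  simp [PySem.List.count_eq]
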